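-- pv_equiv track=rewrite | github.com/light-player/lp-cranelift | scripts/adapt_riscv32_isle.py | remove_rv64_enum_variants
-- ===== SOURCE A (Python) =====
-- RV64_INSTRUCTIONS = [
--     'Addw', 'Subw', 'Sllw', 'Srlw', 'Sraw',  # R-type
--     'Mulw', 'Divw', 'Divuw', 'Remw', 'Remuw',  # M extension
--     'Addiw', 'Slliw', 'SrliW', 'Sraiw',  # I-type
--     'CAddw', 'CSubw', 'CAddiw',  # Compressed
--     'AmoaddW', 'AmoswapW', 'AmoxorW', 'AmoandW', 'AmoorW',  # Atomics
--     'AmominW', 'AmomaxW', 'AmominuW', 'AmomaxuW',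
--     'Rolw', 'Rorw', 'Roriw',  # Bit manipulation
--     'Packw', 'Cpopw', 'Clzw', 'Ctzw',  # More bit ops
-- ]
--
-- def remove_rv64_enum_variants(content):
--     """Remove RV64-specific enum variants from type definitions."""
--     lines = content.split('\n')
--     result = []
--     skip_line = False
--
--     for line in lines:
--         # Check if this line defines an RV64-specific instruction
--         if any(f'({inst})' in line for inst in RV64_INSTRUCTIONS):
--             # Skip this line
--             continue
--         result.append(line)
--
--     return '\n'.join(result)
-- ===== SOURCE B (Python) =====
-- RV64_INSTRUCTIONS = [
--     'Addw', 'Subw', 'Sllw', 'Srlw', 'Sraw',  # R-type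
--     'Mulw', 'Divw', 'Divuw', 'Remw', 'Remuw',  # M extension
--     'Addiw', 'Slliw', 'SrliW', 'Sraiw',  # I-type
--     'CAddw', 'CSubw', 'CAddiw',  # Compressed
--     'AmoaddW', 'AmoswapW', 'AmoxorW', 'AmoandW', 'AmoorW',  # Atomics
--     'AmominW', 'AmomaxW', 'AmominuW', 'AmomaxuW',
--     'Rolw', 'Rorw', 'Roriw',  # Bit manipulation
--     'Packw', 'Cpopw', 'Clzw', 'Ctzw',  # More bit ops
-- ]
--
-- _RV64_SET = frozenset(RV64_INSTRUCTIONS)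
--
--
-- def _line_has_rv64(line):
--     """One pass over the line: collect the text after the latest '(' and
--     test it against the instruction set at the next ')'."""
--     token = None
--     for ch in line:
--         if ch == '(':
--             token = []
--         elif ch == ')':
--             if token is not None and ''.join(token) in _RV64_SET:
--                 return True
--             token = None
--         elif token is not None:
--             token.append(ch)
--     return False
--
--
-- def remove_rv64_enum_variants(content):
--     """Remove RV64-specific enum variants from type definitions."""
--     return '\n'.join(line for line in content.split('\n')
--                      if not _line_has_rv64(line))
-- ===== Notes on version B (the rewrite author's own statement) =====
-- stated objective: alternative
-- what changed: Replaces the per-line any() scan over 32 parenthesized-instruction substring searches with a single character-level pass per line that collects the text between the latest opening parenthesis and the next closing one and tests it once against a frozenset.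
import Mathlib
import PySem

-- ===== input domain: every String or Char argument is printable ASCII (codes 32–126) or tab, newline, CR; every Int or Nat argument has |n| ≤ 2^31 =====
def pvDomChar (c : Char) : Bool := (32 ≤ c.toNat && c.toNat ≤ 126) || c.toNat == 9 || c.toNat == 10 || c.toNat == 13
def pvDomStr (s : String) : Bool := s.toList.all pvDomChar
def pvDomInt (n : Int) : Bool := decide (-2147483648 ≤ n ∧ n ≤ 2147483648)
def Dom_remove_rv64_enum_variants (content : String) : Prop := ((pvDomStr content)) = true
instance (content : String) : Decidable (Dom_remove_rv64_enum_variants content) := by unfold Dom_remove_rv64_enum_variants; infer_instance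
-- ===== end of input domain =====

-- B replaces A's per-line scan over 32 parenthesized-instruction substring searches
-- by a single character-level pass per line (the token between the latest opening
-- parenthesis and the next closing one, one frozenset lookup there); an alternative
-- algorithm, same overall cost.

-- shared module-level constant RV64_INSTRUCTIONS (as lists of chars)
def pvRV64Chars : List (List Char) :=
  ["Addw", "Subw", "Sllw", "Srlw", "Sraw",
   "Mulw", "Divw", "Divuw", "Remw", "Remuw",
   "Addiw", "Slliw", "SrliW", "Sraiw",
   "CAddw", "CSubw", "CAddiw",
   "AmoaddW", "AmoswapW", "AmoxorW", "AmoandW", "AmoorW",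
   "AmominW", "AmomaxW", "AmominuW", "AmomaxuW",
   "Rolw", "Rorw", "Roriw",
   "Packw", "Cpopw", "Clzw", "Ctzw"].map String.toList

-- ===== PORT A =====
def remove_rv64_enum_variants (content : String) : String :=
  let lines := PySem.Chars.splitOn content.toList ['\n']
  let result := lines.foldl (fun acc line =>
      if pvRV64Chars.any (fun inst => PySem.Chars.isIn ('(' :: (inst ++ [')'])) line) then acc
      else acc ++ [line]) []
  String.ofList (PySem.Chars.join ['\n'] result)

-- ===== PORT B =====
-- _RV64_SET = frozenset(RV64_INSTRUCTIONS)
def pvRV64Set : PySem.Set (List Char) := PySem.Set.ofList pvRV64Chars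

-- _line_has_rv64's loop: `tok` is the Python variable `token` (None / collected chars)
def pvScan : List Char → Option (List Char) → Bool
  | [], _ => false
  | c :: cs, tok =>
    if c = '(' then pvScan cs (some [])
    else if c = ')' then
      match tok with
      | some t => if t ∈ pvRV64Set then true else pvScan cs none
      | none => pvScan cs none
    else pvScan cs (tok.map (fun t => t ++ [c]))

def pvLineHasRV64 (line : List Char) : Bool := pvScan line none

def remove_rv64_enum_variants_alt (content : String) : String :=
  String.ofList (PySem.Chars.join ['\n']
    ((PySem.Chars.splitOn content.toList ['\n']).filter (fun line => !(pvLineHasRV64 line))))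

-- ===== PRECONDITION & SPEC =====
def Spec_remove_rv64_enum_variants (content : String) (out : String) : Prop := out = remove_rv64_enum_variants_alt content
instance (content : String) (out : String) : Decidable (Spec_remove_rv64_enum_variants content out) := by unfold Spec_remove_rv64_enum_variants; infer_instance

-- ===== CLAIM (what is proved, stated in full; the proofs are below) =====
def Claim_equal_remove_rv64_enum_variants : Prop := ∀ (content : String), Dom_remove_rv64_enum_variants content → Spec_remove_rv64_enum_variants content (remove_rv64_enum_variants content)

-- ===== LEMMAS AND PROOFS =====

-- the common specification of the per-line test: some "(inst)" is an infix of the line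
def pvFire (cs : List Char) : Prop := ∃ w ∈ pvRV64Chars, ('(' :: (w ++ [')'])) <:+: cs

-- invariant meaning of the accumulator `tok` of pvScan
def pvTok : Option (List Char) → List Char → Prop
  | none, _ => False
  | some t, cs => ∃ u, ('(' ∉ u ∧ ')' ∉ u) ∧ (u ++ [')']) <+: cs ∧ (t ++ u) ∈ pvRV64Chars

lemma pv_closed : ∀ w ∈ pvRV64Chars, '(' ∉ w ∧ ')' ∉ w := by decide

lemma pv_fire_cons (c : Char) (cs : List Char) (h : pvFire cs) : pvFire (c :: cs) :=
  h.imp (fun _ hw => ⟨hw.1, List.IsInfix.trans hw.2 (List.IsSuffix.isInfix (List.suffix_cons c cs))⟩)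

lemma pv_fire_of_cons (c : Char) (cs : List Char) (hne : ¬ c = '(') (h : pvFire (c :: cs)) :
    pvFire cs := by
  obtain ⟨w, hwmem, hinf⟩ := h
  rcases List.infix_cons_iff.mp hinf with hpre | hinf'
  · exact absurd (List.cons_prefix_cons.mp hpre).1.symm hne
  · exact ⟨w, hwmem, hinf'⟩

lemma pv_anyA_iff (cs : List Char) :
    (pvRV64Chars.any (fun inst => PySem.Chars.isIn ('(' :: (inst ++ [')'])) cs)) = true ↔ pvFire cs := by
  simp [List.any_eq_true, PySem.Chars.isIn_iff_infix, pvFire]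

lemma pv_scan_iff : ∀ (cs : List Char) (tok : Option (List Char)),
    pvScan cs tok = true ↔ (pvTok tok cs ∨ pvFire cs) := by
  intro cs
  induction cs with
  | nil =>
    intro tok
    constructor
    · intro h; simp [pvScan] at h
    · rintro (h | h)
      · cases tok with
        | none => exact absurd h id
        | some t =>
          obtain ⟨u, _, hpre, _⟩ := h
          have := hpre.length_le; simp at this
      · obtain ⟨w, _, hinf⟩ := h
        have := hinf.length_le; simp at this
  | cons c cs ih =>
    intro tok
    by_cases hop : c = '('
    · subst hop
      have hstep : pvScan ('(' :: cs) tok = pvScan cs (some []) := by simp [pvScan]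
      rw [hstep, ih]
      constructor
      · rintro (h | h)
        · obtain ⟨u, hucl, hpre, hmem⟩ := h
          exact Or.inr ⟨u, by simpa using hmem, (List.cons_prefix_cons.mpr ⟨rfl, hpre⟩).isInfix⟩
        · exact Or.inr (pv_fire_cons _ _ h)
      · rintro (h | h)
        · cases tok with
          | none => exact absurd h id
          | some t =>
            obtain ⟨u, hucl, hpre, _⟩ := h
            exfalso
            cases u with
            | nil => simp at hpre
            | cons a u' =>
              rw [List.cons_append] at hpre
              exact hucl.1 ((List.cons_prefix_cons.mp hpre).1 ▸ List.mem_cons_self)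
        · obtain ⟨w, hwmem, hinf⟩ := h
          rcases List.infix_cons_iff.mp hinf with hpre | hinf'
          · exact Or.inl ⟨w, pv_closed w hwmem, (List.cons_prefix_cons.mp hpre).2, by simpa using hwmem⟩
          · exact Or.inr ⟨w, hwmem, hinf'⟩
    · by_cases hcl : c = ')'
      · subst hcl
        cases tok with
        | none =>
          have hstep : pvScan (')' :: cs) none = pvScan cs none := by simp [pvScan]
          rw [hstep, ih]
          constructor
          · rintro (h | h)
            · exact absurd h id
            · exact Or.inr (pv_fire_cons _ _ h)
          · rintro (h | h)
            · exact absurd h id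
            · exact Or.inr (pv_fire_of_cons _ _ (by decide) h)
        | some t =>
          have hstep : pvScan (')' :: cs) (some t) =
              if t ∈ pvRV64Set then true else pvScan cs none := by simp [pvScan]
          by_cases hmem : t ∈ pvRV64Set
          · have hmem' : t ∈ pvRV64Chars := (PySem.Set.mem_ofList pvRV64Chars t).mp hmem
            rw [hstep, if_pos hmem]
            constructor
            · intro _
              exact Or.inl ⟨[], ⟨by simp, by simp⟩, by simp, by simpa using hmem'⟩
            · intro _; rfl
          · rw [hstep, if_neg hmem, ih]
            constructor
            · rintro (h | h)
              · exact absurd h id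
              · exact Or.inr (pv_fire_cons _ _ h)
            · rintro (h | h)
              · obtain ⟨u, hucl, hpre, humem⟩ := h
                exfalso
                cases u with
                | nil =>
                  simp only [List.append_nil] at humem
                  exact hmem ((PySem.Set.mem_ofList pvRV64Chars t).mpr humem)
                | cons a u' =>
                  rw [List.cons_append] at hpre
                  exact hucl.2 ((List.cons_prefix_cons.mp hpre).1 ▸ List.mem_cons_self)
              · exact Or.inr (pv_fire_of_cons _ _ (by decide) h)
      · have hstep : pvScan (c :: cs) tok = pvScan cs (tok.map (fun t => t ++ [c])) := by
          simp [pvScan, hop, hcl]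
        rw [hstep]
        cases tok with
        | none =>
          rw [ih]
          constructor
          · rintro (h | h)
            · exact absurd h id
            · exact Or.inr (pv_fire_cons _ _ h)
          · rintro (h | h)
            · exact absurd h id
            · exact Or.inr (pv_fire_of_cons _ _ hop h)
        | some t =>
          rw [ih]
          constructor
          · rintro (h | h)
            · obtain ⟨u, hucl, hpre, humem⟩ := h
              refine Or.inl ⟨c :: u, ⟨?_, ?_⟩, ?_, ?_⟩
              · intro hm
                rcases List.mem_cons.mp hm with h1 | h1
                · exact hop h1.symm
                · exact hucl.1 h1
              · intro hm
                rcases List.mem_cons.mp hm with h1 | h1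
                · exact hcl h1.symm
                · exact hucl.2 h1
              · rw [List.cons_append]; exact List.cons_prefix_cons.mpr ⟨rfl, hpre⟩
              · simpa [List.append_assoc] using humem
            · exact Or.inr (pv_fire_cons _ _ h)
          · rintro (h | h)
            · obtain ⟨u, hucl, hpre, humem⟩ := h
              cases u with
              | nil =>
                rw [List.nil_append] at hpre
                exact absurd (List.cons_prefix_cons.mp hpre).1.symm hcl
              | cons a u' =>
                rw [List.cons_append] at hpre
                obtain ⟨ha, hpre'⟩ := List.cons_prefix_cons.mp hpre
                subst ha
                refine Or.inl ⟨u', ⟨fun hm => hucl.1 (List.mem_cons_of_mem _ hm),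
                       fun hm => hucl.2 (List.mem_cons_of_mem _ hm)⟩, hpre', ?_⟩
                simpa [List.append_assoc] using humem
            · exact Or.inr (pv_fire_of_cons _ _ hop h)

-- per line, A's test equals B's test
lemma pv_line_eq (cs : List Char) :
    (pvRV64Chars.any (fun inst => PySem.Chars.isIn ('(' :: (inst ++ [')'])) cs)) = pvLineHasRV64 cs := by
  rw [Bool.eq_iff_iff, pv_anyA_iff]
  unfold pvLineHasRV64
  rw [pv_scan_iff cs none]
  simp [pvTok]

-- A's foldl with append is the filter B builds
lemma pv_fold_eq (lines : List (List Char)) :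
    lines.foldl (fun acc line =>
      if pvRV64Chars.any (fun inst => PySem.Chars.isIn ('(' :: (inst ++ [')'])) line) then acc
      else acc ++ [line]) [] = lines.filter (fun line => !(pvLineHasRV64 line)) := by
  have hfun : (fun (acc : List (List Char)) line =>
      if pvRV64Chars.any (fun inst => PySem.Chars.isIn ('(' :: (inst ++ [')'])) line) then acc
      else acc ++ [line]) = (fun acc line => if (!(pvLineHasRV64 line)) = true then acc ++ [id line] else acc) := by
    funext acc line
    rw [← pv_line_eq line]
    cases (pvRV64Chars.any (fun inst => PySem.Chars.isIn ('(' :: (inst ++ [')'])) line)) <;> simp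
  rw [hfun, PySem.List.foldl_append_if (fun line => !(pvLineHasRV64 line)) id lines []]
  simp

-- ===== VERDICT (by name: the statement is the Claim_ definition above) =====
theorem remove_rv64_enum_variants_spec : Claim_equal_remove_rv64_enum_variants := by
  intro content _
  show remove_rv64_enum_variants content = remove_rv64_enum_variants_alt content
  simp only [remove_rv64_enum_variants, remove_rv64_enum_variants_alt, pv_fold_eq]
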